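-- pv_equiv track=rewrite | github.com/threegold116/Tool-Star-OCT | evaluation/evaluate/scripts/evaluate.py | count_tag_pairs
-- ===== SOURCE A (Python) =====
-- def count_tag_pairs(s, start_tag, end_tag):
--     count = 0
--     stack = []
--
--     i = 0
--     while i < len(s):
--         if i <= len(s) - len(start_tag) and s[i:i+len(start_tag)] == start_tag:
--             stack.append(i)
--             i += len(start_tag)
--         elif i <= len(s) - len(end_tag) and s[i:i+len(end_tag)] == end_tag:
--             if stack:
--                 stack.pop()
--                 count += 1
--             i += len(end_tag)
--         else:
--             i += 1
--
--     return count
-- ===== SOURCE B (Python) =====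
-- def count_tag_pairs(s, start_tag, end_tag):
--     # pass 1: tokenize the string into a list of events, jumping with str.find:
--     # -1 for each start-tag occurrence, +1 for each end-tag occurrence
--     events = []
--     i = 0
--     while True:
--         sp = s.find(start_tag, i)
--         ep = s.find(end_tag, i)
--         if sp == -1 and ep == -1:
--             break
--         if sp != -1 and (ep == -1 or sp <= ep):
--             events.append(-1)
--             i = sp + len(start_tag)
--         else:
--             events.append(1)
--             i = ep + len(end_tag)
--     # pass 2: matched pairs = all closers minus unmatched closers; the number of
--     # unmatched closers is the maximum prefix surplus of closers over openers
--     surplus = 0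
--     max_surplus = 0
--     for e in events:
--         surplus += e
--         max_surplus = max(max_surplus, surplus)
--     return events.count(1) - max_surplus
-- ===== Notes on version B (the rewrite author's own statement) =====
-- stated objective: faster
-- what changed: Replaces A's single stack-driven character-by-character scan with two staged passes: a tokenizer that jumps between tag occurrences with s.find and emits an event list, then a closed-form count (total closers minus the maximum prefix surplus of closers over openers) instead of any stack or online matched-pair bookkeeping.
-- outside the precondition, e.g. on count_tag_pairs('', '', ''): A returns 0, B does not finish within the time limit
import Mathlib
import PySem

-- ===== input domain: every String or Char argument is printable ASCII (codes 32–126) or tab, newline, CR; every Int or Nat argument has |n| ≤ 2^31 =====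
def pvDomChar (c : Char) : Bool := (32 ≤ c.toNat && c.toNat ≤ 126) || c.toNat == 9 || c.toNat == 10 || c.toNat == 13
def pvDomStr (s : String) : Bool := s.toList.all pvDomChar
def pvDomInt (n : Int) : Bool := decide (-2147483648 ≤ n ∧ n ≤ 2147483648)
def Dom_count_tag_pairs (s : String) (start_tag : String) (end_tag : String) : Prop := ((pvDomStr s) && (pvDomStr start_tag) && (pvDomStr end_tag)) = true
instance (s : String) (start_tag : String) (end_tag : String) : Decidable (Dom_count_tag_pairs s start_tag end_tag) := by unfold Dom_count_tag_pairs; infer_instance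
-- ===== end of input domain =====

-- B replaces A's single stack-driven character scan by two staged passes: a tokenizer that
-- jumps with str.find and emits an event list, then a closed-form count (closers minus the
-- maximum prefix surplus of closers over openers) — same return value; no side effects.

-- ===== PORT A =====
-- A's while loop, step for step. `fuel` only bounds the number of iterations: under
-- Pre_ (both tags nonempty) `i` grows by at least 1 per iteration, so `s.length + 1`
-- iterations always suffice and the fuel never runs out on admitted inputs.
-- `s[i:i+len(t)] == t` is transliterated as `i + t.length ≤ s.length ∧ (s.drop i).take t.length = t`
-- (the Python guard `i <= len(s) - len(t)` over ints is exactly `i + t.length ≤ s.length` since i ≥ 0).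
def pvALoop (s st en : List Char) (fuel : Nat) (i : Nat) (stack : List Int) (count : Int) : Int :=
  match fuel with
  | 0 => count
  | fuel + 1 =>
    if i < s.length then
      if i + st.length ≤ s.length ∧ (s.drop i).take st.length = st then
        pvALoop s st en fuel (i + st.length) (stack ++ [(i : Int)]) count
      else if i + en.length ≤ s.length ∧ (s.drop i).take en.length = en then
        if stack ≠ [] then
          pvALoop s st en fuel (i + en.length) stack.dropLast (count + 1)
        else
          pvALoop s st en fuel (i + en.length) stack count
      else
        pvALoop s st en fuel (i + 1) stack count
    else count

def count_tag_pairs (s : String) (start_tag : String) (end_tag : String) : Int :=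
  pvALoop s.toList start_tag.toList end_tag.toList (s.toList.length + 1) 0 [] 0

-- ===== PORT B =====
-- Source B's first loop (the tokenizer): sp/ep are s.find(tag, i); `.toNat` on the chosen find
-- result is exact because that branch only runs when the result is ≥ 0 (≠ -1).
-- Same fuel bound as A's loop, for the same reason (nonempty tags advance i by ≥ 1).
def pvEvents (s st en : List Char) (fuel : Nat) (i : Nat) : List Int :=
  match fuel with
  | 0 => []
  | fuel + 1 =>
    if PySem.Chars.findFrom s st (i : Int) = -1 ∧ PySem.Chars.findFrom s en (i : Int) = -1 then
      []
    else if PySem.Chars.findFrom s st (i : Int) ≠ -1 ∧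
        (PySem.Chars.findFrom s en (i : Int) = -1 ∨
          PySem.Chars.findFrom s st (i : Int) ≤ PySem.Chars.findFrom s en (i : Int)) then
      (-1) :: pvEvents s st en fuel ((PySem.Chars.findFrom s st (i : Int)).toNat + st.length)
    else
      1 :: pvEvents s st en fuel ((PySem.Chars.findFrom s en (i : Int)).toNat + en.length)

-- Source B's second loop, one step: state = (surplus, max_surplus)
def pvScanStep (acc : Int × Int) (e : Int) : Int × Int :=
  (acc.1 + e, max acc.2 (acc.1 + e))

def count_tag_pairs_alt (s : String) (start_tag : String) (end_tag : String) : Int :=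
  let ev := pvEvents s.toList start_tag.toList end_tag.toList (s.toList.length + 1) 0
  ((ev.count 1 : Nat) : Int) - (ev.foldl pvScanStep (0, 0)).2

-- ===== PRECONDITION & SPEC =====
-- Pre_ excludes an empty start_tag or end_tag: there Python A loops forever on every
-- nonempty s (the empty slice matches and i advances by 0), as does B; the only such
-- input on which A returns (s = "", where the loop body never runs and A returns 0,
-- while B still loops forever because ''.find('', 0) = 0) is excluded with it.
def Pre_count_tag_pairs (s : String) (start_tag : String) (end_tag : String) : Prop :=
  start_tag ≠ "" ∧ end_tag ≠ ""
instance (s : String) (start_tag : String) (end_tag : String) : Decidable (Pre_count_tag_pairs s start_tag end_tag) := by unfold Pre_count_tag_pairs; infer_instance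

def pvWitness_count_tag_pairs : String × String × String := ("<a>x</a><a>", "<a>", "</a>")

def Spec_count_tag_pairs (s : String) (start_tag : String) (end_tag : String) (out : Int) : Prop := out = count_tag_pairs_alt s start_tag end_tag
instance (s : String) (start_tag : String) (end_tag : String) (out : Int) : Decidable (Spec_count_tag_pairs s start_tag end_tag out) := by unfold Spec_count_tag_pairs; infer_instance

-- ===== CLAIM (what is proved, stated in full; the proofs are below) =====
def Claim_equal_count_tag_pairs : Prop := ∀ (s : String) (start_tag : String) (end_tag : String), Dom_count_tag_pairs s start_tag end_tag → Pre_count_tag_pairs s start_tag end_tag → Spec_count_tag_pairs s start_tag end_tag (count_tag_pairs s start_tag end_tag)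

-- ===== LEMMAS AND PROOFS =====

-- proof-internal intermediate loop: the find-jump scan carrying an integer depth and a
-- running count (the online form of B's two passes); A is first proved equal to it, and
-- it is then proved equal to B's tokenize-then-formula computation.
def pvJump (s st en : List Char) (fuel : Nat) (i : Nat) (depth : Int) (count : Int) : Int :=
  match fuel with
  | 0 => count
  | fuel + 1 =>
    if PySem.Chars.findFrom s st (i : Int) = -1 ∧ PySem.Chars.findFrom s en (i : Int) = -1 then
      count
    else if PySem.Chars.findFrom s st (i : Int) ≠ -1 ∧
        (PySem.Chars.findFrom s en (i : Int) = -1 ∨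
          PySem.Chars.findFrom s st (i : Int) ≤ PySem.Chars.findFrom s en (i : Int)) then
      pvJump s st en fuel ((PySem.Chars.findFrom s st (i : Int)).toNat + st.length) (depth + 1) count
    else
      if depth > 0 then
        pvJump s st en fuel ((PySem.Chars.findFrom s en (i : Int)).toNat + en.length) (depth - 1) (count + 1)
      else
        pvJump s st en fuel ((PySem.Chars.findFrom s en (i : Int)).toNat + en.length) depth count

-- A's slice test at position m is exactly "t is a prefix of s.drop m".
lemma pv_cond_iff (s t : List Char) (m : Nat) (hm : m ≤ s.length) :
    (m + t.length ≤ s.length ∧ (s.drop m).take t.length = t) ↔ t <+: s.drop m := by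
  constructor
  · rintro ⟨_, h2⟩
    rw [← h2]; exact List.take_prefix _ _
  · intro h
    have hl := h.length_le
    rw [List.length_drop] at hl
    exact ⟨by omega, (List.prefix_iff_eq_take.mp h).symm⟩

-- a nonempty prefix of s.drop m fits inside s
lemma pv_fit_of_prefix (s t : List Char) (ht : t ≠ []) (m : Nat) (h : t <+: s.drop m) :
    m + t.length ≤ s.length ∧ m < s.length := by
  have hl := h.length_le
  rw [List.length_drop] at hl
  have ht1 : 0 < t.length := List.length_pos_iff.mpr ht
  constructor <;> omega

-- if t occurs nowhere in s.drop i, it is a prefix of no s.drop j with j ≥ i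
lemma pv_noOcc (s t : List Char) (i : Nat) (h : ¬ t <:+: s.drop i) :
    ∀ j, i ≤ j → ¬ t <+: s.drop j := by
  intro j hij hpre
  apply h
  have hdr : List.drop (j - i) (List.drop i s) = List.drop j s := by
    rw [List.drop_drop]; congr 1; omega
  rw [← hdr] at hpre
  exact hpre.isInfix.trans (List.drop_suffix (j - i) (List.drop i s)).isInfix

-- the loop is already finished at i ≥ s.length
lemma pvALoop_at_end (s st en : List Char) (fuel i : Nat) (stack : List Int) (count : Int)
    (h : s.length ≤ i) : pvALoop s st en fuel i stack count = count := by
  cases fuel with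
  | zero => rfl
  | succ f => simp [pvALoop, Nat.not_lt.mpr h]

-- fuel irrelevance for A's loop (both tags nonempty)
lemma pvALoop_succ (s st en : List Char) (hst : st ≠ []) (hen : en ≠ []) :
    ∀ fuel i stack count, s.length ≤ i + fuel →
      pvALoop s st en (fuel + 1) i stack count = pvALoop s st en fuel i stack count := by
  intro fuel
  induction fuel with
  | zero =>
    intro i stack count h
    have hi : ¬ i < s.length := by omega
    simp [pvALoop, hi]
  | succ f ih =>
    intro i stack count h
    have hst1 : 0 < st.length := List.length_pos_iff.mpr hst
    have hen1 : 0 < en.length := List.length_pos_iff.mpr hen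
    conv_lhs => rw [pvALoop]
    conv_rhs => rw [pvALoop]
    split_ifs <;> first
      | rfl
      | (refine ih _ _ _ ?_; omega)

lemma pvALoop_fuel (s st en : List Char) (hst : st ≠ []) (hen : en ≠ []) :
    ∀ k fuel i stack count, s.length ≤ i + fuel →
      pvALoop s st en (fuel + k) i stack count = pvALoop s st en fuel i stack count := by
  intro k
  induction k with
  | zero => intro fuel i stack count _; rfl
  | succ k ih =>
    intro fuel i stack count h
    rw [show fuel + (k + 1) = (fuel + k) + 1 from rfl,
      pvALoop_succ s st en hst hen (fuel + k) i stack count (by omega)]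
    exact ih fuel i stack count h

lemma pvALoop_fuel_eq (s st en : List Char) (hst : st ≠ []) (hen : en ≠ []) (fuel fuel' i : Nat)
    (stack : List Int) (count : Int) (h : s.length ≤ i + fuel) (h' : s.length ≤ i + fuel') :
    pvALoop s st en fuel i stack count = pvALoop s st en fuel' i stack count := by
  rcases Nat.le_total fuel fuel' with hle | hle
  · obtain ⟨k, rfl⟩ := Nat.exists_eq_add_of_le hle
    exact (pvALoop_fuel s st en hst hen k fuel i stack count h).symm
  · obtain ⟨k, rfl⟩ := Nat.exists_eq_add_of_le hle
    exact pvALoop_fuel s st en hst hen k fuel' i stack count h'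

-- A walks silently over a stretch with no tag occurrence
lemma pvALoop_skip (s st en : List Char) (hst : st ≠ []) (hen : en ≠ []) :
    ∀ d i fuel stack count, i + d ≤ s.length → s.length ≤ i + fuel →
      (∀ j, i ≤ j → j < i + d → ¬ st <+: s.drop j ∧ ¬ en <+: s.drop j) →
      pvALoop s st en fuel i stack count = pvALoop s st en fuel (i + d) stack count := by
  intro d
  induction d with
  | zero => intro i fuel stack count _ _ _; rfl
  | succ d ih =>
    intro i fuel stack count hd hfuel hno
    have hi : i < s.length := by omega
    obtain ⟨f, rfl⟩ : ∃ f, fuel = f + 1 := ⟨fuel - 1, by omega⟩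
    have hnost : ¬ st <+: s.drop i := (hno i (le_refl i) (by omega)).1
    have hnoen : ¬ en <+: s.drop i := (hno i (le_refl i) (by omega)).2
    have h1 : ¬ (i + st.length ≤ s.length ∧ (s.drop i).take st.length = st) := by
      rw [pv_cond_iff s st i (by omega)]; exact hnost
    have h2 : ¬ (i + en.length ≤ s.length ∧ (s.drop i).take en.length = en) := by
      rw [pv_cond_iff s en i (by omega)]; exact hnoen
    conv_lhs => rw [pvALoop]
    simp only [if_pos hi, if_neg h1, if_neg h2]
    rw [pvALoop_fuel_eq s st en hst hen f (f + 1) (i + 1) stack count (by omega) (by omega)]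
    rw [ih (i + 1) (f + 1) stack count (by omega) (by omega)
      (fun j hj1 hj2 => hno j (by omega) (by omega))]
    rw [show i + 1 + d = i + (d + 1) from by omega]

-- the simulation: A's (position, stack, count) state equals the jump loop's
-- (position, depth, count) state whenever depth = stack.length
lemma pvMain (s st en : List Char) (hst : st ≠ []) (hen : en ≠ []) :
    ∀ n i stack depth count fuelA fuelB, n = s.length - i → i ≤ s.length →
      s.length < i + fuelA → s.length < i + fuelB → depth = (stack.length : Int) →
      pvALoop s st en fuelA i stack count = pvJump s st en fuelB i depth count := by
  intro n
  induction n using Nat.strong_induction_on with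
  | _ n IH =>
  intro i stack depth count fuelA fuelB hn hi hfa hfb hdep
  have hst1 : 0 < st.length := List.length_pos_iff.mpr hst
  have hen1 : 0 < en.length := List.length_pos_iff.mpr hen
  obtain ⟨fB, rfl⟩ : ∃ fB, fuelB = fB + 1 := ⟨fuelB - 1, by omega⟩
  conv_rhs => rw [pvJump]
  by_cases hcase1 : PySem.Chars.findFrom s st (i : Int) = -1 ∧ PySem.Chars.findFrom s en (i : Int) = -1
  · rw [if_pos hcase1]
    have hnost := pv_noOcc s st i ((PySem.Chars.findFrom_natCast_eq_neg_one_iff s st i hi).mp hcase1.1)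
    have hnoen := pv_noOcc s en i ((PySem.Chars.findFrom_natCast_eq_neg_one_iff s en i hi).mp hcase1.2)
    rw [pvALoop_skip s st en hst hen (s.length - i) i fuelA stack count (by omega) (by omega)
      (fun j hj1 _ => ⟨hnost j hj1, hnoen j hj1⟩)]
    exact pvALoop_at_end s st en fuelA (i + (s.length - i)) stack count (by omega)
  · rw [if_neg hcase1]
    by_cases hcase2 : PySem.Chars.findFrom s st (i : Int) ≠ -1 ∧
        (PySem.Chars.findFrom s en (i : Int) = -1 ∨
          PySem.Chars.findFrom s st (i : Int) ≤ PySem.Chars.findFrom s en (i : Int))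
    · -- the jump loop takes the start branch at position m = sp.toNat
      rw [if_pos hcase2]
      obtain ⟨hsp, hcond⟩ := hcase2
      obtain ⟨hsp_ge, hsp_pre, hsp_min⟩ := PySem.Chars.findFrom_natCast_spec s st i hi hsp
      set sp := PySem.Chars.findFrom s st (i : Int) with hspdef
      set m := sp.toNat with hmdef
      have him : i ≤ m := by omega
      have hfit := pv_fit_of_prefix s st hst m hsp_pre
      have hnoen : ∀ j, i ≤ j → j < m → ¬ en <+: s.drop j := by
        rcases hcond with hep | hle
        · exact fun j hj _ =>
            pv_noOcc s en i ((PySem.Chars.findFrom_natCast_eq_neg_one_iff s en i hi).mp hep) j hj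
        · intro j hj1 hj2
          have hepne : PySem.Chars.findFrom s en (i : Int) ≠ -1 := by omega
          obtain ⟨_, _, hep_min⟩ := PySem.Chars.findFrom_natCast_spec s en i hi hepne
          exact hep_min j hj1 (by omega)
      rw [pvALoop_skip s st en hst hen (m - i) i fuelA stack count (by omega) (by omega)
        (fun j hj1 hj2 => ⟨hsp_min j hj1 (by omega), hnoen j hj1 (by omega)⟩)]
      rw [show i + (m - i) = m from by omega]
      obtain ⟨fA, rfl⟩ : ∃ fA, fuelA = fA + 1 := ⟨fuelA - 1, by omega⟩
      conv_lhs => rw [pvALoop]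
      rw [if_pos hfit.2, if_pos ((pv_cond_iff s st m (by omega)).mpr hsp_pre)]
      refine IH (s.length - (m + st.length)) (by omega) (m + st.length) (stack ++ [(m : Int)])
        (depth + 1) count fA fB rfl (by omega) (by omega) (by omega) ?_
      simp only [List.length_append, List.length_cons, List.length_nil]
      push_cast
      omega
    · -- the jump loop takes the end branch at position m = ep.toNat
      rw [if_neg hcase2]
      have hep : PySem.Chars.findFrom s en (i : Int) ≠ -1 := by tauto
      obtain ⟨hep_ge, hep_pre, hep_min⟩ := PySem.Chars.findFrom_natCast_spec s en i hi hep
      set ep := PySem.Chars.findFrom s en (i : Int) with hepdef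
      set m := ep.toNat with hmdef
      have him : i ≤ m := by omega
      have hfit := pv_fit_of_prefix s en hen m hep_pre
      -- no start-tag occurrence at any j with i ≤ j ≤ m
      have hnost : ∀ j, i ≤ j → j ≤ m → ¬ st <+: s.drop j := by
        by_cases hsp : PySem.Chars.findFrom s st (i : Int) = -1
        · exact fun j hj _ =>
            pv_noOcc s st i ((PySem.Chars.findFrom_natCast_eq_neg_one_iff s st i hi).mp hsp)
              j hj
        · have hlt : ep < PySem.Chars.findFrom s st (i : Int) := by
            rcases not_and_or.mp hcase2 with h | h
            · exact absurd hsp (not_not.mpr (not_not.mp h))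
            · have hnle : ¬ PySem.Chars.findFrom s st (i : Int) ≤ ep :=
                fun hle => h (Or.inr hle)
              omega
          obtain ⟨hsp_ge, _, hsp_min⟩ := PySem.Chars.findFrom_natCast_spec s st i hi hsp
          exact fun j hj1 hj2 => hsp_min j hj1 (by omega)
      rw [pvALoop_skip s st en hst hen (m - i) i fuelA stack count (by omega) (by omega)
        (fun j hj1 hj2 => ⟨hnost j hj1 (by omega), hep_min j hj1 (by omega)⟩)]
      rw [show i + (m - i) = m from by omega]
      obtain ⟨fA, rfl⟩ : ∃ fA, fuelA = fA + 1 := ⟨fuelA - 1, by omega⟩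
      conv_lhs => rw [pvALoop]
      rw [if_pos hfit.2,
        if_neg (fun hc => hnost m him (le_refl m) ((pv_cond_iff s st m (by omega)).mp hc)),
        if_pos ((pv_cond_iff s en m (by omega)).mpr hep_pre)]
      by_cases hsnil : stack = []
      · have hd0 : ¬ depth > 0 := by subst hsnil; simp at hdep; omega
        rw [if_neg (not_not.mpr hsnil), if_neg hd0]
        exact IH (s.length - (m + en.length)) (by omega) (m + en.length) stack depth count fA fB
          rfl (by omega) (by omega) (by omega) hdep
      · have hlen0 : 0 < stack.length := List.length_pos_iff.mpr hsnil
        have hd0 : depth > 0 := by omega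
        rw [if_pos hsnil, if_pos hd0]
        refine IH (s.length - (m + en.length)) (by omega) (m + en.length) stack.dropLast
          (depth - 1) (count + 1) fA fB rfl (by omega) (by omega) (by omega) ?_
        rw [List.length_dropLast]
        omega

-- ---- jump loop = tokenize-then-count ----

-- number of matched closers when processing an event list starting at a given depth
def pvMatched : List Int → Int → Int
  | [], _ => 0
  | e :: ev, d =>
    if e = -1 then pvMatched ev (d + 1)
    else if d > 0 then pvMatched ev (d - 1) + 1
    else pvMatched ev d

-- maximum prefix sum of an event list (including the empty prefix)
def pvMP : List Int → Int
  | [] => 0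
  | e :: ev => max 0 (e + pvMP ev)

lemma pvMP_nonneg : ∀ ev : List Int, 0 ≤ pvMP ev
  | [] => le_refl 0
  | _ :: _ => le_max_left _ _

-- the jump loop computes count + (matched closers of the token stream)
lemma pvJump_eq_matched (s st en : List Char) :
    ∀ fuel i depth count, pvJump s st en fuel i depth count
      = count + pvMatched (pvEvents s st en fuel i) depth := by
  intro fuel
  induction fuel with
  | zero => intro i depth count; simp [pvJump, pvEvents, pvMatched]
  | succ f ih =>
    intro i depth count
    rw [pvJump, pvEvents]
    split_ifs with h1 h2 h3
    · simp [pvMatched]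
    · simp only [pvMatched, if_pos]
      exact ih _ _ _
    · simp only [pvMatched, if_neg (by norm_num : (1 : Int) ≠ -1), if_pos h3]
      rw [ih]; ring
    · simp only [pvMatched, if_neg (by norm_num : (1 : Int) ≠ -1), if_neg h3]
      exact ih _ _ _

-- the tokenizer emits only ±1
lemma pvEvents_pm (s st en : List Char) :
    ∀ fuel i, ∀ e ∈ pvEvents s st en fuel i, e = -1 ∨ e = 1 := by
  intro fuel
  induction fuel with
  | zero => intro i e he; simp [pvEvents] at he
  | succ f ih =>
    intro i e he
    rw [pvEvents] at he
    split_ifs at he with h1 h2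
    · simp at he
    · rcases List.mem_cons.mp he with h | h
      · exact Or.inl h
      · exact ih _ e h
    · rcases List.mem_cons.mp he with h | h
      · exact Or.inr h
      · exact ih _ e h

-- closed form for pvMatched on ±1 streams
lemma pvMatched_formula :
    ∀ ev : List Int, (∀ e ∈ ev, e = -1 ∨ e = 1) → ∀ d : Int, 0 ≤ d →
      pvMatched ev d = ((ev.count 1 : Nat) : Int) - max 0 (pvMP ev - d) := by
  intro ev
  induction ev with
  | nil => intro _ d hd; simp [pvMatched, pvMP]; omega
  | cons e ev ih =>
    intro hpm d hd
    have hmp := pvMP_nonneg ev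
    have hrec := ih (fun x hx => hpm x (List.mem_cons_of_mem e hx))
    rcases hpm e (List.mem_cons_self) with he | he
    · subst he
      rw [pvMatched, if_pos rfl, hrec (d + 1) (by omega)]
      have hc : List.count 1 ((-1 : Int) :: ev) = List.count 1 ev := by
        rw [List.count_cons]; norm_num
      rw [hc, pvMP]
      omega
    · subst he
      rw [pvMatched, if_neg (by norm_num)]
      have hc : ((List.count 1 ((1 : Int) :: ev) : Nat) : Int) = ((List.count 1 ev : Nat) : Int) + 1 := by
        rw [List.count_cons]; norm_num
      rw [hc, pvMP]
      by_cases hd0 : d > 0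
      · rw [if_pos hd0, hrec (d - 1) (by omega)]; omega
      · rw [if_neg hd0, hrec d hd]; omega

-- Source B's second loop computes max m0 (c0 + pvMP ev) whenever c0 ≤ m0
lemma pvScan_snd :
    ∀ (ev : List Int) (c m : Int), c ≤ m →
      (ev.foldl pvScanStep (c, m)).2 = max m (c + pvMP ev) := by
  intro ev
  induction ev with
  | nil => intro c m h; simp [pvMP]; omega
  | cons e ev ih =>
    intro c m h
    have hmp := pvMP_nonneg ev
    rw [List.foldl_cons]
    show (ev.foldl pvScanStep (c + e, max m (c + e))).2 = max m (c + pvMP (e :: ev))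
    rw [ih (c + e) (max m (c + e)) (le_max_right _ _), pvMP]
    omega

-- ===== VERDICT (by name: the statement is the Claim_ definition above) =====
theorem count_tag_pairs_spec : Claim_equal_count_tag_pairs := by
  intro s start_tag end_tag _ hpre
  unfold Spec_count_tag_pairs count_tag_pairs count_tag_pairs_alt
  obtain ⟨h1, h2⟩ := hpre
  have hst : start_tag.toList ≠ [] := fun h => h1 (String.toList_eq_nil_iff.mp h)
  have hen : end_tag.toList ≠ [] := fun h => h2 (String.toList_eq_nil_iff.mp h)
  set sl := s.toList
  set ev := pvEvents sl start_tag.toList end_tag.toList (sl.length + 1) 0 with hev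
  have hA := pvMain sl start_tag.toList end_tag.toList hst hen
    sl.length 0 [] 0 0 (sl.length + 1) (sl.length + 1)
    (by omega) (by omega) (by omega) (by omega) (by simp)
  rw [hA, pvJump_eq_matched, ← hev]
  show 0 + pvMatched ev 0 = ((ev.count 1 : Nat) : Int) - (ev.foldl pvScanStep (0, 0)).2
  rw [pvMatched_formula ev (pvEvents_pm sl start_tag.toList end_tag.toList (sl.length + 1) 0)
      0 (le_refl 0),
    pvScan_snd ev 0 0 (le_refl 0)]
  have := pvMP_nonneg ev
  omega
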